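-- pv_equiv track=rewrite | github.com/RafaelMenesesRibeiro/SameGameAI | samegameai.py | concatenate_lines
-- ===== SOURCE A (Python) =====
-- def is_color(c):
-- 	if isinstance(c, int):
-- 		return True
-- 	return False
--
-- def get_color(board, l, c):
-- 	return board[l][c]
--
-- def set_color(board, l, c, color):
-- 	p = make_pos(l, c)
-- 	if is_color(color):
-- 		board[pos_l(p)][pos_c(p)] = color
--
-- def get_no_color():
-- 	return 0
--
-- def make_pos(l, c):
-- 	if not (isinstance(l, int) and l >= 0 and isinstance(c, int) and c >= 0):
-- 		raise ValueError("new_position: invalid arguments")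
-- 	return (l, c)
--
-- def pos_l(p):
-- 	return p[0]
--
-- def pos_c(p):
-- 	return p[1]
--
-- def concatenate_lines(boardcopy, cluster, index, lines):
-- 	#Initiates the vertical displcament at 0.
-- 	displacement = 0
-- 	clusterindex = index
-- 	#Gets the column in which to remove the empty pieces.
-- 	c = pos_c(cluster[clusterindex])
-- 	#Traverses the lines from the lowest to the highest.
-- 	for l in reversed(range(lines)):
-- 		#If the current piece is empty increments the number of lines the higher
-- 		#pieces need to descend. Gets the next hole coordinates.
-- 		if clusterindex < len(cluster) and l == pos_l(cluster[clusterindex]) and c == pos_c(cluster[clusterindex]):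
-- 			displacement += 1
-- 			clusterindex += 1
-- 			#If the current piece is to be removed, marks it as empty.
-- 			set_color(boardcopy, l, c, get_no_color())
-- 		#If the current piece is valid and it needs to be loweres, lowers it
-- 		#to the lowest empty space in the column and empties its current place.
-- 		elif displacement > 0:
-- 			set_color(boardcopy, l + displacement, c, get_color(boardcopy, l, c))
-- 			set_color(boardcopy, l, c, get_no_color())
-- 	#Returns the index of the next piece to remove (because its in the next
-- 	#column) and the altered board.
-- 	return clusterindex, boardcopy
-- ===== SOURCE B (Python) =====
-- # Two-phase re-implementation: pass 1 scans the cluster once to find the removed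
-- # rows and final cluster index; pass 2 rebuilds the affected column segment in one
-- # splice (k zeros on top of the surviving cells), touching only rows up to the
-- # first removed row. Mutates boardcopy in place like the original (same cells,
-- # same final values).
-- def concatenate_lines(boardcopy, cluster, index, lines):
--     c = cluster[index][1]
--     ci = index
--     removed = []
--     bound = lines
--     while ci < len(cluster):
--         l, cc = cluster[ci]
--         if cc != c or not (0 <= l < bound):
--             break
--         removed.append(l)
--         bound = l
--         ci += 1
--     if removed:
--         top = removed[0]
--         k = len(removed)
--         removedset = set(removed)
--         col = [boardcopy[l][c] for l in range(top + 1)]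
--         newcol = [0] * k + [col[l] for l in range(top + 1) if l not in removedset]
--         for l in range(top + 1):
--             boardcopy[l][c] = newcol[l]
--     return ci, boardcopy
-- ===== Notes on version B (the rewrite author's own statement) =====
-- stated objective: alternative
-- what changed: A interleaves cluster-pointer matching and per-line displacement writes in one pass over all `lines` rows; B first scans the cluster once to collect the removed rows and final index, then rebuilds only the affected column segment (up to the first removed row) as one splice of k zeros over the surviving cells.
import Mathlib
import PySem

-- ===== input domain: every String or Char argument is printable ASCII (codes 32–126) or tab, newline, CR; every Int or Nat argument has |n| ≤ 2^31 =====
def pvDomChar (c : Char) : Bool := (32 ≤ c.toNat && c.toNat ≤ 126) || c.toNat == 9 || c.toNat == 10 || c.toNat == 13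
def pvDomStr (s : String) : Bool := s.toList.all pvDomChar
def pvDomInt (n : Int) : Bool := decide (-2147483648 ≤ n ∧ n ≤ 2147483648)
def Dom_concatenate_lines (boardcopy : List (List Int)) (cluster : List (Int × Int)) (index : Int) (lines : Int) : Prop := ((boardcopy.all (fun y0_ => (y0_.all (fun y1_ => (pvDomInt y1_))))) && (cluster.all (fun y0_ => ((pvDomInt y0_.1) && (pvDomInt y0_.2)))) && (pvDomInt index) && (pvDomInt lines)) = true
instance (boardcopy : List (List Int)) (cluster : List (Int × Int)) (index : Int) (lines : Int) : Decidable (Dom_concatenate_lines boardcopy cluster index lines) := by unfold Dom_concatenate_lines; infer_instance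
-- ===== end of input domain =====

-- B rebuilds the affected column segment in one splice (k zeros over the surviving
-- cells) after a single accounting scan of the cluster, instead of A's per-line
-- displacement loop over all `lines` rows; objective: alternative decomposition.
-- Both A and B mutate `boardcopy` in place in Python, writing the same cells to the
-- same final values; the equivalence proved here is about the returned pair.

-- ===== PORT A =====
-- get_color: board[l][c]; Python wraps negative indices and raises out of range (raising inputs are excluded by Pre_)
def aGet (bd : List (List Int)) (l c : Int) : Int :=
  (PySem.List.pyGet? ((PySem.List.pyGet? bd l).getD []) c).getD 0

-- set_color: make_pos demands 0 ≤ l ∧ 0 ≤ c (else ValueError, excluded by Pre_);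
-- board cells are Int here, so is_color(color) is always true
def aSet (bd : List (List Int)) (l c v : Int) : List (List Int) :=
  if 0 ≤ l ∧ 0 ≤ c then bd.set l.toNat ((bd.getD l.toNat []).set c.toNat v) else bd

-- one iteration of A's for-loop at line l; state = (displacement, clusterindex, boardcopy)
def aStep (cluster : List (Int × Int)) (c : Int) (st : Int × Int × List (List Int)) (l : Int) : Int × Int × List (List Int) :=
  let p := (PySem.List.pyGet? cluster st.2.1).getD (0, 0)
  if st.2.1 < (cluster.length : Int) ∧ l = p.1 ∧ c = p.2 then
    (st.1 + 1, st.2.1 + 1, aSet st.2.2 l c 0)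
  else if 0 < st.1 then
    (st.1, st.2.1, aSet (aSet st.2.2 (l + st.1) c (aGet st.2.2 l c)) l c 0)
  else st

-- 'for l in reversed(range(lines))': l = n-1, n-2, …, 0
def aRec (cluster : List (Int × Int)) (c : Int) : Nat → Int × Int × List (List Int) → Int × Int × List (List Int)
  | 0, st => st
  | n+1, st => aRec cluster c n (aStep cluster c st (n : Int))

def concatenate_lines (boardcopy : List (List Int)) (cluster : List (Int × Int)) (index : Int) (lines : Int) : Int × List (List Int) :=
  let c := ((PySem.List.pyGet? cluster index).getD (0, 0)).2
  let st := aRec cluster c lines.toNat (0, index, boardcopy)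
  (st.2.1, st.2.2)

-- ===== PORT B =====
-- pass 1: the while loop collecting the removed rows and the final cluster index
def clCollect (cluster : List (Int × Int)) (c : Int) (ci : Int) (bound : Nat) : List Int × Int :=
  if ci < (cluster.length : Int) then
    match PySem.List.pyGet? cluster ci with
    | some lc =>
      if hc : lc.2 = c ∧ 0 ≤ lc.1 ∧ lc.1 < (bound : Int) then
        let r := clCollect cluster c (ci + 1) lc.1.toNat
        (lc.1 :: r.1, r.2)
      else ([], ci)
    | none => ([], ci)  -- Python raises IndexError here; excluded by Pre_
  else ([], ci)
termination_by bound
decreasing_by exact by omega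

-- boardcopy[l][c] = v  (0 ≤ l and, inside Pre_, 0 ≤ c)
def setCell (bd : List (List Int)) (l cn : Nat) (v : Int) : List (List Int) :=
  bd.set l ((bd.getD l []).set cn v)

def concatenate_lines_alt (boardcopy : List (List Int)) (cluster : List (Int × Int)) (index : Int) (lines : Int) : Int × List (List Int) :=
  let c := ((PySem.List.pyGet? cluster index).getD (0, 0)).2
  let rc := clCollect cluster c index lines.toNat
  match rc.1 with
  | [] => (rc.2, boardcopy)
  | top :: _ =>
    let k := rc.1.length
    let col := (List.range (top.toNat + 1)).map (fun l => (boardcopy.getD l []).getD c.toNat 0)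
    let newcol := List.replicate k 0 ++
      (((List.range (top.toNat + 1)).filter (fun (l : Nat) => decide (((l : Nat) : Int) ∉ rc.1))).map (fun l => col.getD l 0))
    let bd' := (List.range (top.toNat + 1)).foldl (fun b l => setCell b l c.toNat (newcol.getD l 0)) boardcopy
    (rc.2, bd')

-- ===== PRECONDITION & SPEC =====
-- Pre_ excludes exactly the inputs on which A raises: cluster[index] out of range
-- (IndexError), and — when the starting cluster cell's line is inside [0, lines),
-- so that column collapsing actually happens — a negative column (ValueError in
-- make_pos) or a board too short / rows up to that line too narrow (IndexError).
def Pre_concatenate_lines (boardcopy : List (List Int)) (cluster : List (Int × Int)) (index : Int) (lines : Int) : Prop :=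
  (PySem.List.pyGet? cluster index).isSome = true ∧
  (0 ≤ ((PySem.List.pyGet? cluster index).getD (0, 0)).1 ∧
     ((PySem.List.pyGet? cluster index).getD (0, 0)).1 < lines →
   0 ≤ ((PySem.List.pyGet? cluster index).getD (0, 0)).2 ∧
   ((PySem.List.pyGet? cluster index).getD (0, 0)).1 < (boardcopy.length : Int) ∧
   ∀ row ∈ boardcopy.take (((PySem.List.pyGet? cluster index).getD (0, 0)).1.toNat + 1),
     ((PySem.List.pyGet? cluster index).getD (0, 0)).2 < (row.length : Int))
instance (boardcopy : List (List Int)) (cluster : List (Int × Int)) (index : Int) (lines : Int) : Decidable (Pre_concatenate_lines boardcopy cluster index lines) := by unfold Pre_concatenate_lines; infer_instance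

def pvWitness_concatenate_lines : List (List Int) × (List (Int × Int)) × Int × Int :=
  ([[1, 2], [3, 4]], [(0, 1), (9, 9)], 0, 2)

def Spec_concatenate_lines (boardcopy : List (List Int)) (cluster : List (Int × Int)) (index : Int) (lines : Int) (out : Int × List (List Int)) : Prop := out = concatenate_lines_alt boardcopy cluster index lines
instance (boardcopy : List (List Int)) (cluster : List (Int × Int)) (index : Int) (lines : Int) (out : Int × List (List Int)) : Decidable (Spec_concatenate_lines boardcopy cluster index lines out) := by unfold Spec_concatenate_lines; infer_instance

-- ===== CLAIM (what is proved, stated in full; the proofs are below) =====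
def Claim_equal_concatenate_lines : Prop := ∀ (boardcopy : List (List Int)) (cluster : List (Int × Int)) (index : Int) (lines : Int), Dom_concatenate_lines boardcopy cluster index lines → Pre_concatenate_lines boardcopy cluster index lines → Spec_concatenate_lines boardcopy cluster index lines (concatenate_lines boardcopy cluster index lines)

-- ===== LEMMAS AND PROOFS =====

-- value of column cn at row x
def colVal (cn : Nat) (bd : List (List Int)) (x : Nat) : Int := (bd.getD x []).getD cn 0

-- write g x into column cn of every existing row x < n
def writeCol (cn n : Nat) (g : Nat → Int) (bd : List (List Int)) : List (List Int) :=
  bd.mapIdx (fun x row => if x < n then row.set cn (g x) else row)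

-- survivors of column cn among the first m rows, given removed rows R
def SURV (cn : Nat) (bd : List (List Int)) (m : Nat) (R : List Int) : List Int :=
  ((List.range m).filter (fun (l : Nat) => decide (((l : Nat) : Int) ∉ R))).map (colVal cn bd)

-- the final column contents: zeros below d+k, then the surviving cells, then untouched
def fModel (cn : Nat) (bd : List (List Int)) (m d : Nat) (R : List Int) (x : Nat) : Int :=
  if d + R.length ≤ x ∧ x < d + m then (SURV cn bd m R).getD (x - (d + R.length)) 0
  else if x < m then 0
  else colVal cn bd x


lemma length_writeCol (cn n : Nat) (g : Nat → Int) (bd : List (List Int)) :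
    (writeCol cn n g bd).length = bd.length := by
  simp [writeCol]

lemma getElem_writeCol (cn n : Nat) (g : Nat → Int) (bd : List (List Int)) (x : Nat)
    (hx : x < bd.length) :
    (writeCol cn n g bd)[x]'(by simpa [length_writeCol] using hx) =
      if x < n then bd[x].set cn (g x) else bd[x] := by
  simp [writeCol]

lemma writeCol_congr (cn n : Nat) {g g' : Nat → Int} (bd : List (List Int))
    (h : ∀ x, x < n → g x = g' x) : writeCol cn n g bd = writeCol cn n g' bd := by
  unfold writeCol
  apply List.ext_getElem (by simp)
  intro x hx1 hx2
  simp only [List.getElem_mapIdx]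
  by_cases hxn : x < n
  · simp [hxn, h x hxn]
  · simp [hxn]

lemma aSet_natCast (bd : List (List Int)) (l : Nat) (c v : Int) (hc : 0 ≤ c) :
    aSet bd (l : Int) c v = bd.set l ((bd.getD l []).set c.toNat v) := by
  simp [aSet, hc]

lemma aGet_natCast (bd : List (List Int)) (l : Nat) (c : Int) (hc : 0 ≤ c)
    (hl : l < bd.length) (hw : c.toNat < (bd.getD l []).length) :
    aGet bd (l : Int) c = colVal c.toNat bd l := by
  unfold aGet colVal
  rw [PySem.List.pyGet?_natCast, List.getElem?_eq_getElem hl]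
  have hrow : bd[l] = bd.getD l [] := (List.getD_eq_getElem bd [] hl).symm
  rw [Option.getD_some, hrow, PySem.List.pyGet?_of_nonneg _ hc,
    List.getElem?_eq_getElem hw, Option.getD_some, List.getD_eq_getElem _ _ hw]

lemma pyGet_some_range {α : Type} {xs : List α} {i : Int} {a : α}
    (h : PySem.List.pyGet? xs i = some a) : -(xs.length : Int) ≤ i ∧ i < (xs.length : Int) := by
  by_cases hin : PySem.Raise.InRange xs.length i
  · simpa [PySem.Raise.InRange] using hin
  · rw [(PySem.List.pyGet?_eq_none_iff xs i).mpr hin] at h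
    simp at h

lemma pyGet_isSome_of_range {α : Type} (xs : List α) (i : Int)
    (h1 : -(xs.length : Int) ≤ i) (h2 : i < (xs.length : Int)) :
    (PySem.List.pyGet? xs i).isSome = true := by
  rcases ho : PySem.List.pyGet? xs i with _ | a
  · rw [PySem.List.pyGet?_eq_none_iff] at ho
    exact absurd ⟨h1, h2⟩ ho
  · rfl

-- pass-1 entries are lines in [0, bound)
lemma clCollect_mem (cluster : List (Int × Int)) (c : Int) :
    ∀ (bound : Nat) (ci : Int), ∀ r ∈ (clCollect cluster c ci bound).1, 0 ≤ r ∧ r < (bound : Int) := by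
  intro bound
  induction bound using Nat.strong_induction_on with
  | _ bound ih =>
    intro ci r hr
    rw [clCollect] at hr
    split at hr
    · split at hr
      · split at hr
        · rename_i lc heq hcnd
          simp only [List.mem_cons] at hr
          rcases hr with rfl | hr
          · exact ⟨hcnd.2.1, hcnd.2.2⟩
          · have hlt : lc.1.toNat < bound := by omega
            have := ih lc.1.toNat hlt (ci + 1) r hr
            omega
        · simp at hr
      · simp at hr
    · simp at hr

lemma clCollect_nodup (cluster : List (Int × Int)) (c : Int) :
    ∀ (bound : Nat) (ci : Int), (clCollect cluster c ci bound).1.Nodup := by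
  intro bound
  induction bound using Nat.strong_induction_on with
  | _ bound ih =>
    intro ci
    rw [clCollect]
    split
    · split
      · split
        · rename_i lc heq hcnd
          have hlt : lc.1.toNat < bound := by omega
          refine List.nodup_cons.mpr ⟨?_, ih lc.1.toNat hlt (ci + 1)⟩
          intro hmem
          have := clCollect_mem cluster c lc.1.toNat (ci + 1) lc.1 hmem
          omega
        · simp
      · simp
    · simp

lemma nodup_len_le (m : Nat) (R : List Int) (hmem : ∀ r ∈ R, 0 ≤ r ∧ r < (m : Int))
    (hnd : R.Nodup) : R.length ≤ m := by
  have hmap : (R.map Int.toNat).Nodup := by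
    refine hnd.map_on ?_
    intro x hx y hy hxy
    have hx' := hmem x hx; have hy' := hmem y hy
    omega
  have hsub : R.map Int.toNat ⊆ List.range m := by
    intro a ha
    rcases List.mem_map.mp ha with ⟨r, hr, rfl⟩
    have := hmem r hr
    simp only [List.mem_range]
    omega
  simpa using (hmap.subperm hsub).length_le

lemma filter_notmem_length (m : Nat) (R : List Int) (hmem : ∀ r ∈ R, 0 ≤ r ∧ r < (m : Int))
    (hnd : R.Nodup) :
    ((List.range m).filter (fun (l : Nat) => !decide (((l : Nat) : Int) ∈ R))).length = m - R.length := by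
  induction R with
  | nil => simp
  | cons r R' ih =>
    have hr := hmem r (by simp)
    have hnd' : R'.Nodup := hnd.of_cons
    have hrR' : r ∉ R' := by
      intro h; exact (List.nodup_cons.mp hnd).1 h
    have hmem' : ∀ s ∈ R', 0 ≤ s ∧ s < (m : Int) := fun s hs => hmem s (by simp [hs])
    have hsplit : (List.range m).filter (fun (l : Nat) => !decide (((l : Nat) : Int) ∈ r :: R')) =
        ((List.range m).filter (fun (l : Nat) => !decide (((l : Nat) : Int) ∈ R'))).filter
          (fun (l : Nat) => l ≠ r.toNat) := by
      rw [List.filter_filter]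
      apply List.filter_congr
      intro l hl
      have : ((l : Nat) : Int) = r ↔ l = r.toNat := by omega
      simp [List.mem_cons, this]
    rw [hsplit]
    set xs := (List.range m).filter (fun (l : Nat) => !decide (((l : Nat) : Int) ∈ R')) with hxs
    have hxsnd : xs.Nodup := (List.nodup_range).filter _
    have hmemxs : r.toNat ∈ xs := by
      rw [hxs]
      simp only [List.mem_filter, List.mem_range]
      constructor
      · omega
      · simpa [Int.toNat_of_nonneg hr.1] using hrR'
    have herase : xs.filter (fun l => l ≠ r.toNat) = xs.erase r.toNat := by
      rw [hxsnd.erase_eq_filter]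
      apply List.filter_congr; intro a ha; by_cases h : a = r.toNat <;> simp [h]
    rw [herase, List.length_erase_of_mem hmemxs]
    have hxslen : xs.length = m - R'.length := ih hmem' hnd'
    have hlen1 : 1 ≤ xs.length := List.length_pos_of_mem hmemxs
    simp only [List.length_cons]
    omega

lemma length_SURV (cn : Nat) (bd : List (List Int)) (m : Nat) (R : List Int)
    (hmem : ∀ r ∈ R, 0 ≤ r ∧ r < (m : Int)) (hnd : R.Nodup) :
    (SURV cn bd m R).length = m - R.length := by
  simp [SURV, filter_notmem_length m R hmem hnd]

lemma SURV_succ (cn : Nat) (bd : List (List Int)) (m : Nat) (R : List Int)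
    (hm : ((m : Nat) : Int) ∉ R) :
    SURV cn bd (m + 1) R = SURV cn bd m R ++ [colVal cn bd m] := by
  unfold SURV
  rw [List.range_succ, List.filter_append, List.map_append]
  simp [hm]

lemma SURV_cons_drop (cn : Nat) (bd : List (List Int)) (m : Nat) (R : List Int) :
    SURV cn bd m (((m : Nat) : Int) :: R) = SURV cn bd m R := by
  unfold SURV
  congr 1
  apply List.filter_congr
  intro l hl
  have hl' := List.mem_range.mp hl
  have hne : ((l : Nat) : Int) ≠ ((m : Nat) : Int) := by omega
  simp [List.mem_cons, hne]

lemma SURV_board_congr (cn : Nat) {bd bd' : List (List Int)} (m : Nat) (R : List Int)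
    (h : ∀ x, x < m → colVal cn bd x = colVal cn bd' x) :
    SURV cn bd m R = SURV cn bd' m R := by
  unfold SURV
  apply List.map_congr_left
  intro l hl
  exact h l (List.mem_range.mp (List.mem_of_mem_filter hl))

lemma colVal_set_self (cn : Nat) (bd : List (List Int)) (r : Nat) (v : Int)
    (hr : r < bd.length) (hw : cn < (bd.getD r []).length) :
    colVal cn (bd.set r ((bd.getD r []).set cn v)) r = v := by
  unfold colVal
  have h1 : r < (bd.set r ((bd.getD r []).set cn v)).length := by simpa using hr
  rw [List.getD_eq_getElem _ _ h1, List.getElem_set, if_pos rfl,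
    List.getD_eq_getElem _ _ (by simpa using hw), List.getElem_set, if_pos rfl]

lemma getDrow_set_ne (bd : List (List Int)) (r x : Nat) (row : List Int)
    (hx : r ≠ x) : (bd.set r row).getD x [] = bd.getD x [] := by
  by_cases hxl : x < bd.length
  · rw [List.getD_eq_getElem _ _ (by simpa using hxl), List.getElem_set, if_neg hx,
      List.getD_eq_getElem _ _ hxl]
  · rw [List.getD_eq_default _ _ (by simpa using Nat.le_of_not_lt hxl),
      List.getD_eq_default _ _ (Nat.le_of_not_lt hxl)]

lemma colVal_set_ne (cn : Nat) (bd : List (List Int)) (r x : Nat) (row : List Int)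
    (hx : r ≠ x) : colVal cn (bd.set r row) x = colVal cn bd x := by
  unfold colVal
  rw [getDrow_set_ne bd r x row hx]

lemma writeCol_id (cn n : Nat) (bd : List (List Int))
    (hw : ∀ x, x < n → cn < (bd.getD x []).length) :
    writeCol cn n (colVal cn bd) bd = bd := by
  apply List.ext_getElem (by simp [length_writeCol])
  intro x hx1 hx2
  rw [getElem_writeCol cn n _ bd x hx2]
  by_cases hxn : x < n
  · rw [if_pos hxn]
    have hcw : cn < bd[x].length := by
      have := hw x hxn
      rwa [List.getD_eq_getElem _ _ hx2] at this
    unfold colVal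
    rw [List.getD_eq_getElem _ _ hx2, List.getD_eq_getElem _ _ hcw]
    exact List.set_getElem_self hcw
  · rw [if_neg hxn]

lemma aStep_match {cluster : List (Int × Int)} {c disp ci : Int} {bd : List (List Int)} {l : Int}
    (h : ci < (cluster.length : Int) ∧ l = ((PySem.List.pyGet? cluster ci).getD (0, 0)).1 ∧
      c = ((PySem.List.pyGet? cluster ci).getD (0, 0)).2) :
    aStep cluster c (disp, ci, bd) l = (disp + 1, ci + 1, aSet bd l c 0) := by
  unfold aStep
  rw [if_pos h]

lemma aStep_skip_zero {cluster : List (Int × Int)} {c ci : Int} {bd : List (List Int)} {l : Int}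
    (h : ¬(ci < (cluster.length : Int) ∧ l = ((PySem.List.pyGet? cluster ci).getD (0, 0)).1 ∧
      c = ((PySem.List.pyGet? cluster ci).getD (0, 0)).2)) :
    aStep cluster c (0, ci, bd) l = (0, ci, bd) := by
  unfold aStep
  rw [if_neg h, if_neg (lt_irrefl 0)]

lemma aStep_move {cluster : List (Int × Int)} {c disp ci : Int} {bd : List (List Int)} {l : Int}
    (h : ¬(ci < (cluster.length : Int) ∧ l = ((PySem.List.pyGet? cluster ci).getD (0, 0)).1 ∧
      c = ((PySem.List.pyGet? cluster ci).getD (0, 0)).2)) (hd : 0 < disp) :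
    aStep cluster c (disp, ci, bd) l =
      (disp, ci, aSet (aSet bd (l + disp) c (aGet bd l c)) l c 0) := by
  unfold aStep
  rw [if_neg h, if_pos hd]

-- ===== the three board-rebuild equalities =====
lemma ext_match (cn m d : Nat) (bd : List (List Int)) (R : List Int)
    (hR : ∀ r ∈ R, 0 ≤ r ∧ r < (m : Int)) (hnd : R.Nodup)
    (hlen : m + 1 + d ≤ bd.length)
    (hw : ∀ x, x < m + 1 + d → cn < (bd.getD x []).length) :
    writeCol cn (m + 1 + d) (fModel cn bd (m + 1) d (((m : Nat) : Int) :: R)) bd =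
      writeCol cn (m + (d + 1)) (fModel cn (bd.set m ((bd.getD m []).set cn 0)) m (d + 1) R)
        (bd.set m ((bd.getD m []).set cn 0)) := by
  set bd1 := bd.set m ((bd.getD m []).set cn 0) with hbd1
  have hSL : SURV cn bd (m + 1) (((m : Nat) : Int) :: R) = SURV cn bd1 m R := by
    have h1 : SURV cn bd (m + 1) (((m : Nat) : Int) :: R) =
        SURV cn bd m (((m : Nat) : Int) :: R) := by
      unfold SURV
      rw [List.range_succ, List.filter_append]
      simp
    rw [h1, SURV_cons_drop]
    exact SURV_board_congr cn m R (fun x hx => (colVal_set_ne cn bd m x _ (by omega)).symm)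
  have hmlen : m < bd.length := by omega
  have hcm : cn < (bd.getD m []).length := hw m (by omega)
  have hf : ∀ x, x < m + 1 + d →
      fModel cn bd (m + 1) d (((m : Nat) : Int) :: R) x = fModel cn bd1 m (d + 1) R x := by
    intro x hx
    unfold fModel
    simp only [List.length_cons]
    by_cases hdest : d + (R.length + 1) ≤ x ∧ x < d + (m + 1)
    · rw [if_pos hdest, if_pos (show (d + 1) + R.length ≤ x ∧ x < (d + 1) + m by omega), hSL]
      congr 1
      omega
    · rw [if_neg hdest, if_neg (show ¬((d + 1) + R.length ≤ x ∧ x < (d + 1) + m) by omega)]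
      by_cases hxm : x < m
      · rw [if_pos (show x < m + 1 by omega), if_pos hxm]
      · by_cases hxe : x = m
        · subst hxe
          rw [if_pos (show x < x + 1 by omega), if_neg (show ¬ x < x by omega)]
          exact (colVal_set_self cn bd x 0 hmlen hcm).symm
        · rw [if_neg (show ¬ x < m + 1 by omega), if_neg (show ¬ x < m by omega)]
          exact (colVal_set_ne cn bd m x _ (by omega)).symm
  apply List.ext_getElem (by simp [length_writeCol, hbd1])
  intro x hx1 hx2
  have hxbd : x < bd.length := by simpa [length_writeCol] using hx1
  have hxbd1 : x < bd1.length := by simpa [hbd1] using hxbd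
  rw [getElem_writeCol cn _ _ bd x hxbd, getElem_writeCol cn _ _ bd1 x hxbd1]
  have hb1 : bd1[x]'hxbd1 = if m = x then (bd.getD m []).set cn 0 else bd[x]'hxbd := by
    simp only [hbd1]
    rw [List.getElem_set]
  by_cases hxn : x < m + 1 + d
  · rw [if_pos hxn, if_pos (show x < m + (d + 1) by omega), hb1]
    by_cases hxm : x = m
    · rw [if_pos hxm.symm, List.set_set, hf x hxn]
      subst hxm
      rw [List.getD_eq_getElem _ _ hxbd]
    · rw [if_neg (fun h => hxm h.symm), hf x hxn]
  · rw [if_neg hxn, if_neg (show ¬ x < m + (d + 1) by omega), hb1,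
      if_neg (show ¬ m = x by omega)]

lemma ext_idle (cn m : Nat) (bd : List (List Int)) (R : List Int)
    (hR : ∀ r ∈ R, 0 ≤ r ∧ r < (m : Int)) (hnd : R.Nodup)
    (hlen : m + 1 ≤ bd.length)
    (hw : ∀ x, x < m + 1 → cn < (bd.getD x []).length) :
    writeCol cn (m + 1) (fModel cn bd (m + 1) 0 R) bd =
      writeCol cn m (fModel cn bd m 0 R) bd := by
  have hms : ((m : Nat) : Int) ∉ R := fun h => by have := hR _ h; omega
  have hk : R.length ≤ m := nodup_len_le m R hR hnd
  have hSlen : (SURV cn bd m R).length = m - R.length := length_SURV cn bd m R hR hnd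
  have hSsucc : SURV cn bd (m + 1) R = SURV cn bd m R ++ [colVal cn bd m] :=
    SURV_succ cn bd m R hms
  have hmlen : m < bd.length := by omega
  apply List.ext_getElem (by simp [length_writeCol])
  intro x hx1 hx2
  have hxbd : x < bd.length := by simpa [length_writeCol] using hx1
  rw [getElem_writeCol cn _ _ bd x hxbd, getElem_writeCol cn _ _ bd x hxbd]
  by_cases hxm : x < m
  · rw [if_pos (show x < m + 1 by omega), if_pos hxm]
    congr 1
    unfold fModel
    by_cases hdest : R.length ≤ x
    · rw [if_pos (show 0 + R.length ≤ x ∧ x < 0 + (m + 1) by omega),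
        if_pos (show 0 + R.length ≤ x ∧ x < 0 + m by omega), hSsucc,
        List.getD_append _ _ _ _ (by omega)]
    · rw [if_neg (show ¬(0 + R.length ≤ x ∧ x < 0 + (m + 1)) by omega),
        if_pos (show x < m + 1 by omega),
        if_neg (show ¬(0 + R.length ≤ x ∧ x < 0 + m) by omega), if_pos hxm]
  · by_cases hxe : x = m
    · rw [if_pos (show x < m + 1 by omega), if_neg (show ¬ x < m by omega)]
      have hfm : fModel cn bd (m + 1) 0 R x = colVal cn bd x := by
        unfold fModel
        rw [if_pos (show 0 + R.length ≤ x ∧ x < 0 + (m + 1) by omega), hSsucc,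
          List.getD_append_right _ _ _ _ (by omega)]
        have h0 : x - (0 + R.length) - (SURV cn bd m R).length = 0 := by omega
        rw [h0]
        subst hxe
        rfl
      rw [hfm]
      have hcw : cn < (bd[x]'hxbd).length := by
        have := hw x (by omega)
        rwa [List.getD_eq_getElem _ _ hxbd] at this
      unfold colVal
      rw [List.getD_eq_getElem _ _ hxbd, List.getD_eq_getElem _ _ hcw]
      exact List.set_getElem_self hcw
    · rw [if_neg (show ¬ x < m + 1 by omega), if_neg (show ¬ x < m by omega)]

lemma ext_move (cn m d : Nat) (bd : List (List Int)) (R : List Int) (hd : 0 < d)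
    (hR : ∀ r ∈ R, 0 ≤ r ∧ r < (m : Int)) (hnd : R.Nodup)
    (hlen : m + 1 + d ≤ bd.length)
    (hw : ∀ x, x < m + 1 + d → cn < (bd.getD x []).length) :
    writeCol cn (m + 1 + d) (fModel cn bd (m + 1) d R) bd =
      writeCol cn (m + d)
        (fModel cn ((bd.set (m + d) ((bd.getD (m + d) []).set cn (colVal cn bd m))).set m ((bd.getD m []).set cn 0)) m d R)
        ((bd.set (m + d) ((bd.getD (m + d) []).set cn (colVal cn bd m))).set m ((bd.getD m []).set cn 0)) := by
  set v := colVal cn bd m with hv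
  set bdA := bd.set (m + d) ((bd.getD (m + d) []).set cn v) with hbdA
  set bd' := bdA.set m ((bd.getD m []).set cn 0) with hbd'
  have hms : ((m : Nat) : Int) ∉ R := fun h => by have := hR _ h; omega
  have hk : R.length ≤ m := nodup_len_le m R hR hnd
  have hSlen : (SURV cn bd m R).length = m - R.length := length_SURV cn bd m R hR hnd
  have hlenA : bdA.length = bd.length := by simp [hbdA]
  have hlen' : bd'.length = bd.length := by simp [hbd', hbdA]
  have hmlen : m < bd.length := by omega
  have hmdlen : m + d < bd.length := by omega
  have hcm : cn < (bd.getD m []).length := hw m (by omega)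
  have hcolm : ∀ x, x < m → colVal cn bd' x = colVal cn bd x := by
    intro x hx
    rw [hbd', colVal_set_ne cn bdA m x _ (by omega), hbdA,
      colVal_set_ne cn bd (m + d) x _ (by omega)]
  have hS' : SURV cn bd' m R = SURV cn bd m R :=
    SURV_board_congr cn m R (fun x hx => (hcolm x hx))
  have hSsucc : SURV cn bd (m + 1) R = SURV cn bd m R ++ [colVal cn bd m] :=
    SURV_succ cn bd m R hms
  have hAm : bdA.getD m [] = bd.getD m [] := by
    rw [hbdA]
    exact getDrow_set_ne bd (m + d) m _ (by omega)
  have hcolm' : colVal cn bd' m = 0 := by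
    rw [hbd', ← hAm]
    exact colVal_set_self cn bdA m 0 (by omega) (by rw [hAm]; exact hcm)
  have hf : ∀ x, x < m + d → fModel cn bd (m + 1) d R x = fModel cn bd' m d R x := by
    intro x hx
    unfold fModel
    by_cases hdest : d + R.length ≤ x
    · rw [if_pos (show d + R.length ≤ x ∧ x < d + (m + 1) by omega),
        if_pos (show d + R.length ≤ x ∧ x < d + m by omega), hS', hSsucc,
        List.getD_append _ _ _ _ (by omega)]
    · rw [if_neg (show ¬(d + R.length ≤ x ∧ x < d + (m + 1)) by omega),
        if_neg (show ¬(d + R.length ≤ x ∧ x < d + m) by omega)]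
      by_cases hxm : x < m
      · rw [if_pos (show x < m + 1 by omega), if_pos hxm]
      · by_cases hxe : x = m
        · subst hxe
          rw [if_pos (show x < x + 1 by omega), if_neg (show ¬ x < x by omega), hcolm']
        · rw [if_neg (show ¬ x < m + 1 by omega), if_neg (show ¬ x < m by omega), hbd',
            colVal_set_ne cn bdA m x _ (by omega), hbdA,
            colVal_set_ne cn bd (m + d) x _ (by omega)]
  apply List.ext_getElem (by simp [length_writeCol, hlen'])
  intro x hx1 hx2
  have hxbd : x < bd.length := by simpa [length_writeCol] using hx1
  have hxbd' : x < bd'.length := by omega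
  rw [getElem_writeCol cn _ _ bd x hxbd, getElem_writeCol cn _ _ bd' x hxbd']
  have hb' : bd'[x]'hxbd' = if m = x then (bd.getD m []).set cn 0
      else if m + d = x then (bd.getD (m + d) []).set cn v else bd[x]'hxbd := by
    simp only [hbd', hbdA]
    rw [List.getElem_set]
    by_cases h1 : m = x
    · rw [if_pos h1, if_pos h1]
    · rw [if_neg h1, if_neg h1, List.getElem_set]
  by_cases hx3 : x < m + d
  · rw [if_pos (show x < m + 1 + d by omega), if_pos hx3, hb']
    by_cases hxm : m = x
    · rw [if_pos hxm, List.set_set, hf x hx3]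
      subst hxm
      rw [List.getD_eq_getElem _ _ hmlen]
    · rw [if_neg hxm, if_neg (show m + d = x → False by omega), hf x hx3]
  · by_cases hxe : x = m + d
    · rw [if_pos (show x < m + 1 + d by omega), if_neg (show ¬ x < m + d by omega), hb',
        if_neg (show ¬ m = x by omega), if_pos hxe.symm]
      have hfL : fModel cn bd (m + 1) d R x = v := by
        unfold fModel
        rw [if_pos (show d + R.length ≤ x ∧ x < d + (m + 1) by omega), hSsucc,
          List.getD_append_right _ _ _ _ (by omega)]
        have h0 : x - (d + R.length) - (SURV cn bd m R).length = 0 := by omega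
        rw [h0, hv]
        rfl
      rw [hfL]
      subst hxe
      rw [List.getD_eq_getElem _ _ hmdlen]
    · rw [if_neg (show ¬ x < m + 1 + d by omega), if_neg (show ¬ x < m + d by omega), hb',
        if_neg (show ¬ m = x by omega), if_neg (show ¬ m + d = x by omega)]

-- ===== pass-1 unfoldings =====
lemma clCollect_eq_some {cluster : List (Int × Int)} {c ci : Int} {lc : Int × Int}
    (bound : Nat) (hci : ci < (cluster.length : Int))
    (heq : PySem.List.pyGet? cluster ci = some lc) :
    clCollect cluster c ci bound =
      if lc.2 = c ∧ 0 ≤ lc.1 ∧ lc.1 < (bound : Int) then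
        (lc.1 :: (clCollect cluster c (ci + 1) lc.1.toNat).1, (clCollect cluster c (ci + 1) lc.1.toNat).2)
      else ([], ci) := by
  conv_lhs => rw [clCollect]
  rw [if_pos hci, heq]
  split
  · rename_i lc' heq'
    obtain rfl : lc = lc' := by injection heq'
    by_cases h : lc.2 = c ∧ 0 ≤ lc.1 ∧ lc.1 < (bound : Int)
    · rw [dif_pos h, if_pos h]
    · rw [dif_neg h, if_neg h]
  · rename_i heq'
    exact absurd heq' (by simp)

lemma clCollect_eq_none {cluster : List (Int × Int)} {c ci : Int} (bound : Nat)
    (heq : PySem.List.pyGet? cluster ci = none) :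
    clCollect cluster c ci bound = ([], ci) := by
  rw [clCollect]
  split
  · rw [heq]
  · rfl

lemma clCollect_eq_not_lt {cluster : List (Int × Int)} {c ci : Int} (bound : Nat)
    (hci : ¬ ci < (cluster.length : Int)) :
    clCollect cluster c ci bound = ([], ci) := by
  rw [clCollect, if_neg hci]

lemma clCollect_skip (cluster : List (Int × Int)) (c : Int) (ci : Int) (m : Nat)
    (hM : ¬(ci < (cluster.length : Int) ∧ ((m : Nat) : Int) = ((PySem.List.pyGet? cluster ci).getD (0, 0)).1 ∧ c = ((PySem.List.pyGet? cluster ci).getD (0, 0)).2)) :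
    clCollect cluster c ci (m + 1) = clCollect cluster c ci m := by
  push_neg at hM
  by_cases hci : ci < (cluster.length : Int)
  · rcases heq : PySem.List.pyGet? cluster ci with _ | lc
    · rw [clCollect_eq_none _ heq, clCollect_eq_none _ heq]
    · rw [clCollect_eq_some _ hci heq, clCollect_eq_some _ hci heq]
      have hp : ((PySem.List.pyGet? cluster ci).getD (0, 0)) = lc := by rw [heq]; rfl
      by_cases hc2 : lc.2 = c
      · have hne : lc.1 ≠ ((m : Nat) : Int) := by
          intro h
          exact (hM hci (by rw [hp, ← h]) (by rw [hp, hc2])).elim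
        by_cases hcnd : lc.2 = c ∧ 0 ≤ lc.1 ∧ lc.1 < ((m : Nat) : Int)
        · rw [if_pos hcnd, if_pos ⟨hcnd.1, hcnd.2.1, by push_cast; omega⟩]
        · rw [if_neg hcnd, if_neg (fun h => hcnd ⟨h.1, h.2.1, by
            have h3 := h.2.2; push_cast at h3 ⊢; omega⟩)]
      · rw [if_neg (fun h => hc2 h.1), if_neg (fun h => hc2 h.1)]
  · rw [clCollect_eq_not_lt _ hci, clCollect_eq_not_lt _ hci]

lemma clCollect_match (cluster : List (Int × Int)) (c : Int) (ci : Int) (m : Nat)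
    {p : Int × Int} (hs : PySem.List.pyGet? cluster ci = some p)
    (hp1 : p.1 = ((m : Nat) : Int)) (hp2 : p.2 = c) :
    clCollect cluster c ci (m + 1) =
      (p.1 :: (clCollect cluster c (ci + 1) m).1, (clCollect cluster c (ci + 1) m).2) := by
  have hci := pyGet_some_range hs
  rw [clCollect_eq_some _ hci.2 hs, if_pos ⟨hp2, by omega, by push_cast; omega⟩]
  have hm : p.1.toNat = m := by omega
  rw [hm]

lemma clCollect_zero (cluster : List (Int × Int)) (c ci : Int) :
    clCollect cluster c ci 0 = ([], ci) := by
  by_cases hci : ci < (cluster.length : Int)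
  · rcases heq : PySem.List.pyGet? cluster ci with _ | lc
    · exact clCollect_eq_none _ heq
    · rw [clCollect_eq_some 0 hci heq, if_neg (by rintro ⟨h1, h2, h3⟩; omega)]
  · exact clCollect_eq_not_lt _ hci

-- ===== the main loop correspondence =====
lemma aux_main (cluster : List (Int × Int)) (c : Int) (hc : 0 ≤ c) :
    ∀ (m : Nat) (d : Nat) (ci : Int) (bd : List (List Int)),
      -(cluster.length : Int) ≤ ci →
      m + d ≤ bd.length →
      (∀ x, x < m + d → c.toNat < (bd.getD x []).length) →
      (aRec cluster c m ((d : Int), ci, bd)).2 =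
        ((clCollect cluster c ci m).2,
         writeCol c.toNat (m + d) (fModel c.toNat bd m d (clCollect cluster c ci m).1) bd) := by
  intro m
  induction m with
  | zero =>
    intro d ci bd hci hlen hw
    rw [clCollect_zero]
    show (ci, bd) = (ci, writeCol c.toNat (0 + d) (fModel c.toNat bd 0 d []) bd)
    rw [writeCol_congr c.toNat (0 + d) bd
        (fun x hx => by
          unfold fModel
          rw [if_neg (by omega), if_neg (by omega)]),
      writeCol_id c.toNat (0 + d) bd (by simpa using hw)]
  | succ m ih =>
    intro d ci bd hci hlen hw
    have hunf : aRec cluster c (m + 1) ((d : Int), ci, bd) =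
        aRec cluster c m (aStep cluster c ((d : Int), ci, bd) ((m : Nat) : Int)) := rfl
    rw [hunf]
    by_cases hM : ci < (cluster.length : Int) ∧
        ((m : Nat) : Int) = ((PySem.List.pyGet? cluster ci).getD (0, 0)).1 ∧
        c = ((PySem.List.pyGet? cluster ci).getD (0, 0)).2
    · -- the cluster pointer matches line m: remove this cell
      obtain ⟨lc, hs⟩ : ∃ lc, PySem.List.pyGet? cluster ci = some lc := by
        rcases ho : PySem.List.pyGet? cluster ci with _ | lc
        · exact absurd (pyGet_isSome_of_range cluster ci hci hM.1) (by rw [ho]; simp)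
        · exact ⟨lc, rfl⟩
      have hgd : ((PySem.List.pyGet? cluster ci).getD (0, 0)) = lc := by rw [hs]; rfl
      rw [aStep_match hM, aSet_natCast bd m c 0 hc]
      have hcast : (d : Int) + 1 = ((d + 1 : Nat) : Int) := by push_cast; ring
      rw [hcast]
      have hw1 : ∀ x, x < m + (d + 1) →
          c.toNat < ((bd.set m ((bd.getD m []).set c.toNat 0)).getD x []).length := by
        intro x hx
        by_cases hxm : m = x
        · subst hxm
          have hrow : (bd.set m ((bd.getD m []).set c.toNat 0)).getD m [] =
              (bd.getD m []).set c.toNat 0 := by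
            rw [List.getD_eq_getElem _ _ (by simpa using (by omega : m < bd.length)),
              List.getElem_set, if_pos rfl]
          rw [hrow, List.length_set]
          exact hw m (by omega)
        · rw [getDrow_set_ne bd m x _ hxm]
          exact hw x (by omega)
      rw [ih (d + 1) (ci + 1) (bd.set m ((bd.getD m []).set c.toNat 0)) (by omega)
        (by simpa using (by omega : m + (d + 1) ≤ bd.length)) hw1]
      rw [clCollect_match cluster c ci m hs (by rw [← hgd, ← hM.2.1]) (by rw [← hgd, ← hM.2.2])]
      have hp1 : lc.1 = ((m : Nat) : Int) := by rw [← hgd, ← hM.2.1]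
      rw [hp1]
      dsimp only
      rw [ext_match c.toNat m d bd (clCollect cluster c (ci + 1) m).1
        (clCollect_mem cluster c m (ci + 1)) (clCollect_nodup cluster c m (ci + 1)) hlen hw]
    · -- no match at line m
      have hskip := clCollect_skip cluster c ci m hM
      by_cases hd : 0 < d
      · have hdI : (0 : Int) < (d : Int) := by exact_mod_cast hd
        rw [aStep_move hM hdI]
        have hmd : ((m : Nat) : Int) + (d : Int) = ((m + d : Nat) : Int) := by push_cast; ring
        rw [hmd, aGet_natCast bd m c hc (by omega) (hw m (by omega)),
          aSet_natCast bd (m + d) c _ hc, aSet_natCast _ m c 0 hc,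
          getDrow_set_ne bd (m + d) m _ (by omega)]
        set bd2 := (bd.set (m + d) ((bd.getD (m + d) []).set c.toNat (colVal c.toNat bd m))).set m
          ((bd.getD m []).set c.toNat 0) with hbd2
        have hlen2 : bd2.length = bd.length := by simp [hbd2]
        have hw2 : ∀ x, x < m + d → c.toNat < (bd2.getD x []).length := by
          intro x hx
          by_cases hxm : m = x
          · have hrow : bd2.getD x [] = (bd.getD m []).set c.toNat 0 := by
              rw [hbd2, ← hxm, List.getD_eq_getElem _ _ (by simp; omega),
                List.getElem_set, if_pos rfl]
            rw [hrow, List.length_set]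
            exact hw m (by omega)
          · by_cases hxmd : m + d = x
            · have hrow : bd2.getD x [] = (bd.getD (m + d) []).set c.toNat (colVal c.toNat bd m) := by
                rw [hbd2, getDrow_set_ne _ m x _ hxm, ← hxmd,
                  List.getD_eq_getElem _ _ (by simp; omega), List.getElem_set, if_pos rfl]
              rw [hrow, List.length_set]
              exact hw (m + d) (by omega)
            · rw [hbd2, getDrow_set_ne _ m x _ hxm, getDrow_set_ne _ (m + d) x _ hxmd]
              exact hw x (by omega)
        rw [ih d ci bd2 hci (by omega) hw2, hskip, hbd2]
        rw [ext_move c.toNat m d bd (clCollect cluster c ci m).1 hd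
          (clCollect_mem cluster c m ci) (clCollect_nodup cluster c m ci) hlen hw]
      · have hd0 : d = 0 := by omega
        subst hd0
        have hstz : aStep cluster c (((0 : Nat) : Int), ci, bd) ((m : Nat) : Int) =
            (((0 : Nat) : Int), ci, bd) := by
          rw [show (((0 : Nat) : Int)) = (0 : Int) by simp]
          exact aStep_skip_zero hM
        rw [hstz, ih 0 ci bd hci (by omega) (fun x hx => hw x (by omega)), hskip]
        rw [ext_idle c.toNat m bd (clCollect cluster c ci m).1
          (clCollect_mem cluster c m ci) (clCollect_nodup cluster c m ci)
          (by omega) (fun x hx => hw x (by omega)), Nat.add_zero]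

-- ===== top-level reductions =====
lemma aRec_hi (cluster : List (Int × Int)) (c : Int) (index : Int) (bd : List (List Int))
    {p : Int × Int} (hs : PySem.List.pyGet? cluster index = some p) (hp0 : 0 ≤ p.1) :
    ∀ (n : Nat), p.1.toNat + 1 ≤ n →
      aRec cluster c n (0, index, bd) = aRec cluster c (p.1.toNat + 1) (0, index, bd) := by
  intro n
  induction n with
  | zero => intro h; exact absurd h (by omega)
  | succ n ihn =>
    intro h
    by_cases he : p.1.toNat + 1 = n + 1
    · rw [he]
    · have hn : p.1.toNat + 1 ≤ n := by omega
      have hgd : ((PySem.List.pyGet? cluster index).getD (0, 0)) = p := by rw [hs]; rfl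
      have hns : ((n : Nat) : Int) ≠ p.1 := by omega
      have hunf : aRec cluster c (n + 1) (0, index, bd) =
          aRec cluster c n (aStep cluster c (0, index, bd) ((n : Nat) : Int)) := rfl
      rw [hunf, aStep_skip_zero (fun hcond => hns (by rw [hgd] at hcond; exact hcond.2.1)),
        ihn hn]

lemma aRec_idle (cluster : List (Int × Int)) (c : Int) (index lines : Int) (bd : List (List Int))
    {p : Int × Int} (hs : PySem.List.pyGet? cluster index = some p)
    (hno : ¬(0 ≤ p.1 ∧ p.1 < lines)) (hc : c = p.2) :
    ∀ (n : Nat), n ≤ lines.toNat → aRec cluster c n (0, index, bd) = (0, index, bd) := by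
  intro n
  induction n with
  | zero => intro _; rfl
  | succ n ihn =>
    intro h
    have hgd : ((PySem.List.pyGet? cluster index).getD (0, 0)) = p := by rw [hs]; rfl
    have hns : ((n : Nat) : Int) ≠ p.1 := by
      intro he
      exact hno ⟨by omega, by omega⟩
    have hunf : aRec cluster c (n + 1) (0, index, bd) =
        aRec cluster c n (aStep cluster c (0, index, bd) ((n : Nat) : Int)) := rfl
    rw [hunf, aStep_skip_zero (fun hcond => hns (by rw [hgd] at hcond; exact hcond.2.1)),
      ihn (by omega)]

lemma clCollect_idle (cluster : List (Int × Int)) (c : Int) (index lines : Int)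
    {p : Int × Int} (hs : PySem.List.pyGet? cluster index = some p)
    (hno : ¬(0 ≤ p.1 ∧ p.1 < lines)) (hc : c = p.2) :
    clCollect cluster c index lines.toNat = ([], index) := by
  rw [clCollect_eq_some lines.toNat (pyGet_some_range hs).2 hs,
    if_neg (fun h => hno ⟨h.2.1, by omega⟩)]

lemma clCollect_hi (cluster : List (Int × Int)) (c : Int) (index lines : Int)
    {p : Int × Int} (hs : PySem.List.pyGet? cluster index = some p)
    (h0 : 0 ≤ p.1 ∧ p.1 < lines) (hc : c = p.2) :
    clCollect cluster c index lines.toNat = clCollect cluster c index (p.1.toNat + 1) := by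
  rw [clCollect_eq_some lines.toNat (pyGet_some_range hs).2 hs,
    clCollect_eq_some (p.1.toNat + 1) (pyGet_some_range hs).2 hs,
    if_pos ⟨hc.symm, h0.1, by omega⟩, if_pos ⟨hc.symm, h0.1, by omega⟩]

-- B's write-back loop is writeCol
lemma foldl_setCell (cn : Nat) (g : Nat → Int) :
    ∀ (n : Nat) (bd : List (List Int)),
      (List.range n).foldl (fun b l => setCell b l cn (g l)) bd = writeCol cn n g bd := by
  intro n
  induction n with
  | zero =>
    intro bd
    apply List.ext_getElem (by simp [writeCol])
    intro x hx1 hx2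
    simp [writeCol]
  | succ n ih =>
    intro bd
    rw [List.range_succ, List.foldl_append, ih, List.foldl_cons, List.foldl_nil]
    unfold setCell writeCol
    apply List.ext_getElem (by simp)
    intro x hx1 hx2
    have hxlen : x < bd.length := by simpa using hx2
    by_cases hxn : x = n
    · rw [List.getElem_set, if_pos hxn.symm, List.getElem_mapIdx, if_pos (by omega)]
      have hxlen' : n < bd.length := by omega
      have hW : n < (List.mapIdx (fun y row => if y < n then row.set cn (g y) else row) bd).length := by
        simpa using hxlen'
      rw [List.getD_eq_getElem _ _ hW, List.getElem_mapIdx, if_neg (by omega)]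
      subst hxn
      rfl
    · rw [List.getElem_set, if_neg (fun h => hxn h.symm), List.getElem_mapIdx,
        List.getElem_mapIdx]
      by_cases hlt : x < n
      · rw [if_pos hlt, if_pos (by omega)]
      · rw [if_neg hlt, if_neg (by omega)]

lemma newcol_getD (cn m : Nat) (R : List Int) (bd : List (List Int))
    (hR : ∀ r ∈ R, 0 ≤ r ∧ r < (m : Int)) (hnd : R.Nodup) (x : Nat) (hx : x < m) :
    (List.replicate R.length 0 ++
      (((List.range m).filter (fun (l : Nat) => decide (((l : Nat) : Int) ∉ R))).map
        (fun l => (((List.range m).map (fun l2 => (bd.getD l2 []).getD cn 0)).getD l 0)))).getD x 0 =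
      fModel cn bd m 0 R x := by
  have hsurv : ((List.range m).filter (fun (l : Nat) => decide (((l : Nat) : Int) ∉ R))).map
      (fun l => (((List.range m).map (fun l2 => (bd.getD l2 []).getD cn 0)).getD l 0)) =
      SURV cn bd m R := by
    unfold SURV
    apply List.map_congr_left
    intro l hl
    have hlm : l < m := List.mem_range.mp (List.mem_of_mem_filter hl)
    have hll : l < ((List.range m).map (fun l2 => (bd.getD l2 []).getD cn 0)).length := by
      simpa using hlm
    rw [List.getD_eq_getElem _ _ hll, List.getElem_map]
    simp [colVal]
  rw [hsurv]
  unfold fModel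
  have hrep : (List.replicate R.length (0 : Int)).length = R.length := by simp
  by_cases hk : R.length ≤ x
  · rw [List.getD_append_right _ _ _ _ (by omega),
      if_pos (show 0 + R.length ≤ x ∧ x < 0 + m by omega), hrep, Nat.zero_add]
  · rw [List.getD_append _ _ _ _ (by omega),
      if_neg (show ¬(0 + R.length ≤ x ∧ x < 0 + m) by omega), if_pos hx,
      List.getD_eq_getElem _ _ (by omega : x < (List.replicate R.length (0 : Int)).length),
      List.getElem_replicate]

theorem concatenate_lines_spec : Claim_equal_concatenate_lines := by
  unfold Claim_equal_concatenate_lines Spec_concatenate_lines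
  intro bd cluster index lines hdom hpre
  obtain ⟨hsome, hrest⟩ := hpre
  obtain ⟨p, hs⟩ := Option.isSome_iff_exists.mp hsome
  have hgd : ((PySem.List.pyGet? cluster index).getD (0, 0)) = p := by rw [hs]; rfl
  rw [hgd] at hrest
  simp only [concatenate_lines, concatenate_lines_alt, hgd]
  by_cases h0 : 0 ≤ p.1 ∧ p.1 < lines
  · obtain ⟨hc2, hlen0, hwtake⟩ := hrest h0
    have hw0 : ∀ x, x < p.1.toNat + 1 → p.2.toNat < (bd.getD x []).length := by
      intro x hx
      have hxlen : x < bd.length := by omega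
      have hxk : x < (bd.take (p.1.toNat + 1)).length := by
        simp [List.length_take]
        omega
      have hmem : (bd.take (p.1.toNat + 1))[x] ∈ bd.take (p.1.toNat + 1) :=
        List.getElem_mem hxk
      have hrow := hwtake _ hmem
      rw [List.getElem_take] at hrow
      rw [List.getD_eq_getElem _ _ hxlen]
      omega
    have hm1 : p.1.toNat + 1 ≤ lines.toNat := by omega
    rw [aRec_hi cluster p.2 index bd hs h0.1 lines.toNat hm1]
    have hmain := aux_main cluster p.2 hc2 (p.1.toNat + 1) 0 index bd
      (pyGet_some_range hs).1 (by omega) (by simpa using hw0)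
    simp only [Nat.cast_zero, Nat.add_zero] at hmain
    rw [hmain]
    have hT := clCollect_match cluster p.2 index p.1.toNat hs (by omega) rfl
    have hBcl : clCollect cluster p.2 index lines.toNat =
        (p.1 :: (clCollect cluster p.2 (index + 1) p.1.toNat).1,
         (clCollect cluster p.2 (index + 1) p.1.toNat).2) := by
      rw [clCollect_hi cluster p.2 index lines hs h0 rfl]
      exact hT
    rw [hBcl, hT]
    have hR : ∀ r ∈ p.1 :: (clCollect cluster p.2 (index + 1) p.1.toNat).1,
        0 ≤ r ∧ r < ((p.1.toNat + 1 : Nat) : Int) := by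
      intro r hr
      rcases List.mem_cons.mp hr with rfl | hr
      · constructor <;> omega
      · have := clCollect_mem cluster p.2 p.1.toNat (index + 1) r hr
        constructor <;> omega
    have hnd : (p.1 :: (clCollect cluster p.2 (index + 1) p.1.toNat).1).Nodup := by
      refine List.nodup_cons.mpr ⟨?_, clCollect_nodup cluster p.2 p.1.toNat (index + 1)⟩
      intro hmem
      have := clCollect_mem cluster p.2 p.1.toNat (index + 1) p.1 hmem
      omega
    dsimp only
    rw [foldl_setCell p.2.toNat _ (p.1.toNat + 1) bd,
      writeCol_congr p.2.toNat (p.1.toNat + 1) bd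
        (fun x hx => newcol_getD p.2.toNat (p.1.toNat + 1)
          (p.1 :: (clCollect cluster p.2 (index + 1) p.1.toNat).1) bd hR hnd x hx)]
  · rw [aRec_idle cluster p.2 index lines bd hs h0 rfl lines.toNat (le_refl _),
      clCollect_idle cluster p.2 index lines hs h0 rfl]
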